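-- pv_equiv track=rewrite | github.com/MrBrantCode/unitest_baseline | mut_generate/mist_train_taco/taco_16700/solution.py | calculate_maximum_beauty
-- ===== SOURCE A (Python) =====
-- def calculate_maximum_beauty(n, k, book_prices):
--     # Precompute the prefix sums for efficient range sum calculations
--     sums = [[0] * (n + 1) for _ in range(n + 1)]
--     for i in range(n):
--         for j in range(i + 1, n + 1):
--             sums[i][j] = sums[i][j - 1] + book_prices[j - 1]
--
--     class SearchProblem:
--         def __init__(self, a, n, k):
--             self.a = a
--             self.n = n
--             self.k = k
--             self.maxResult = 0
--
--         def search(self, currResult, currIndex, currLines):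
--             if currLines > 0 and currResult <= self.maxResult:
--                 return
--             if currLines == self.k - 1:
--                 lastSum = sums[currIndex][self.n]
--                 currResult = currResult & lastSum
--                 if currResult > self.maxResult:
--                     self.maxResult = currResult
--                 return
--             for nextIndex in range(currIndex + 1, self.n + 1):
--                 currSum = sums[currIndex][nextIndex]
--                 if currLines == 0:
--                     nextResult = currSum
--                 else:
--                     nextResult = currResult & currSum
--                 self.search(nextResult, nextIndex, currLines + 1)
--
--     problem = SearchProblem(book_prices, n, k)
--     if k == 1:
--         return sum(book_prices)
--     problem.search(0, 0, 0)
--     return problem.maxResult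
-- ===== SOURCE B (Python) =====
-- def calculate_maximum_beauty(n, k, book_prices):
--     # one segment: the whole list; impossible k: no valid split, beauty 0
--     if k == 1:
--         return sum(book_prices)
--     if k < 1 or k > n:
--         return 0
--     prefix = [0] * (n + 1)
--     for i in range(n):
--         prefix[i + 1] = prefix[i] + book_prices[i]
--     # vals[i] = set of AND values achievable by splitting books i..n-1 into the
--     # current number of segments (the last cut may sit at n, as in A's search)
--     vals = [{prefix[n] - prefix[i]} for i in range(n + 1)]
--     for _ in range(k - 1):
--         vals = [{(prefix[t] - prefix[i]) & v for t in range(i + 1, n + 1) for v in vals[t]}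
--                 for i in range(n + 1)]
--     return max(vals[0])
-- ===== Notes on version B (the rewrite author's own statement) =====
-- stated objective: alternative
-- what changed: A's recursive branch-and-bound DFS over cut positions (a SearchProblem class with a mutable maxResult and a prune that is unsound for negative sums) is replaced by a suffix dynamic program that propagates, per start index, the deduplicated set of achievable AND values and takes the max.
-- outside the precondition, e.g. on calculate_maximum_beauty(3, 3, [-1, 8, 8]): A returns 0, B returns 8; on calculate_maximum_beauty(2, 2, [-1, 7]): A returns 0, B returns 7
import Mathlib
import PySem

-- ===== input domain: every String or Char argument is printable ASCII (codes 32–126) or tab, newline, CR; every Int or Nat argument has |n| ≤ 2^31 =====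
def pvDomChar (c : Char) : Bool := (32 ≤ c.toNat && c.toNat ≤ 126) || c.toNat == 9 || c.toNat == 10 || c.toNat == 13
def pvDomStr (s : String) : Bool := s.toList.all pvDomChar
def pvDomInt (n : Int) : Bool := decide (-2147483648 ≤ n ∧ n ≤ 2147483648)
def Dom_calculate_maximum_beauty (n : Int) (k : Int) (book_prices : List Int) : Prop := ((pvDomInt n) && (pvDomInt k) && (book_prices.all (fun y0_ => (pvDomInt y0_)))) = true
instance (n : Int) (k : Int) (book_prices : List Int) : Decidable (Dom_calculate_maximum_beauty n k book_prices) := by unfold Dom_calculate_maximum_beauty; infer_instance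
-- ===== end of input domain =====

-- B replaces A's branch-and-bound DFS over cut positions by a suffix DP over sets of
-- achievable AND values (objective: alternative algorithm, no speed claim).

-- ===== PORT A =====
-- sums[i][j] = sums[i][j-1] + book_prices[j-1], built exactly as A builds it
def pvSumsA (n : Int) (bp : List Int) : List (List Int) :=
  (PySem.List.pyRange 0 n 1).foldl (fun S i =>
    (PySem.List.pyRange (i+1) (n+1) 1).foldl (fun S j =>
      PySem.List.pySetD S i (PySem.List.pySetD (PySem.List.pyGetD S i []) j
        (PySem.List.pyGetD (PySem.List.pyGetD S i []) (j-1) 0 + PySem.List.pyGetD bp (j-1) 0))) S)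
    ((PySem.List.pyRange 0 (n+1) 1).map (fun _ => PySem.List.pyRepeat [(0:Int)] (n+1)))

-- SearchProblem.search, with self.maxResult threaded as the last argument / result
def pvSearchA (S : List (List Int)) (n k : Int) (currResult currIndex currLines maxResult : Int) : Int :=
  if currLines > 0 ∧ currResult ≤ maxResult then maxResult
  else if currLines = k - 1 then
    let lastSum := PySem.List.pyGetD (PySem.List.pyGetD S currIndex []) n 0
    let r := PySem.Int.band currResult lastSum
    if r > maxResult then r else maxResult
  else
    (PySem.List.pyRange (currIndex+1) (n+1) 1).attach.foldl (fun m t =>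
      let currSum := PySem.List.pyGetD (PySem.List.pyGetD S currIndex []) t.1 0
      let nextResult := if currLines = 0 then currSum else PySem.Int.band currResult currSum
      pvSearchA S n k nextResult t.1 (currLines+1) m) maxResult
termination_by (n + 1 - currIndex).toNat
decreasing_by
  have := (PySem.List.mem_pyRange_one.mp t.2)
  omega

def calculate_maximum_beauty (n : Int) (k : Int) (book_prices : List Int) : Int :=
  let sums := pvSumsA n book_prices
  if k = 1 then book_prices.sum
  else pvSearchA sums n k 0 0 0 0

-- ===== PORT B =====
def calculate_maximum_beauty_alt (n : Int) (k : Int) (book_prices : List Int) : Int :=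
  if k = 1 then book_prices.sum
  else if k < 1 ∨ k > n then 0
  else
  let pref : List Int := (PySem.List.pyRange 0 n 1).foldl (fun P i =>
      PySem.List.pySetD P (i+1) (PySem.List.pyGetD P i 0 + PySem.List.pyGetD book_prices i 0))
      (PySem.List.pyRepeat [(0:Int)] (n+1))
  let vals0 : List (PySem.Set Int) := (PySem.List.pyRange 0 (n+1) 1).map (fun i =>
      PySem.Set.ofList [PySem.List.pyGetD pref n 0 - PySem.List.pyGetD pref i 0])
  let vals := (PySem.List.pyRange 0 (k-1) 1).foldl (fun vs _ =>
      (PySem.List.pyRange 0 (n+1) 1).map (fun i =>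
        PySem.Set.ofList ((PySem.List.pyRange (i+1) (n+1) 1).flatMap (fun t =>
          (PySem.List.pyGetD vs t []).map (fun v =>
            PySem.Int.band (PySem.List.pyGetD pref t 0 - PySem.List.pyGetD pref i 0) v))))) vals0
  (PySem.List.max? (PySem.List.pyGetD vals 0 []) (fun v => v)).getD 0

-- ===== PRECONDITION & SPEC =====
-- Pre_ excludes the inputs where A does not return a value a re-implementation can match:
-- n > len(book_prices), where A raises IndexError, and negative prices with 2 ≤ k ≤ n,
-- where A's 0-initialised prune 'currResult <= maxResult' is unsound for bitwise AND of
-- negative sums and returns accidental values of the search order.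
def Pre_calculate_maximum_beauty (n : Int) (k : Int) (book_prices : List Int) : Prop :=
  n ≤ (book_prices.length : Int) ∧
    (2 ≤ k ∧ k ≤ n → ∀ p ∈ book_prices.take n.toNat, 0 ≤ p)
instance (n : Int) (k : Int) (book_prices : List Int) : Decidable (Pre_calculate_maximum_beauty n k book_prices) := by unfold Pre_calculate_maximum_beauty; infer_instance
def pvWitness_calculate_maximum_beauty : Int × Int × List Int := (3, 2, [1, 2, 3])

def Spec_calculate_maximum_beauty (n : Int) (k : Int) (book_prices : List Int) (out : Int) : Prop := out = calculate_maximum_beauty_alt n k book_prices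
instance (n : Int) (k : Int) (book_prices : List Int) (out : Int) : Decidable (Spec_calculate_maximum_beauty n k book_prices out) := by unfold Spec_calculate_maximum_beauty; infer_instance

-- ===== CLAIM (what is proved, stated in full; the proofs are below) =====
def Claim_equal_calculate_maximum_beauty : Prop := ∀ (n : Int) (k : Int) (book_prices : List Int), Dom_calculate_maximum_beauty n k book_prices → Pre_calculate_maximum_beauty n k book_prices → Spec_calculate_maximum_beauty n k book_prices (calculate_maximum_beauty n k book_prices)

-- ===== LEMMAS AND PROOFS =====

-- pref sum of the first i books (i : Int, clamped like both ports only use it in range)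
def pvPre (bp : List Int) (i : Int) : Int := (bp.take i.toNat).sum
-- sum of books i..j-1
def pvSeg (bp : List Int) (i j : Int) : Int := pvPre bp j - pvPre bp i
-- all AND values of splitting books i..n-1 into j segments, cut points strictly
-- increasing and ≤ n (so the final segment may be empty), in A's enumeration order
def pvVals (bp : List Int) (nn : Int) : Int → Nat → List Int
  | _, 0 => []
  | i, 1 => [pvSeg bp i nn]
  | i, (j+2) => (PySem.List.pyRange (i+1) (nn+1) 1).flatMap (fun t =>
      (pvVals bp nn t (j+1)).map (fun v => PySem.Int.band (pvSeg bp i t) v))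

-- basic band facts on nonnegative ints
theorem pv_band_le_left (a b : Int) (ha : 0 ≤ a) (hb : 0 ≤ b) : PySem.Int.band a b ≤ a := by
  rw [PySem.Int.band_of_nonneg ha hb]
  have h := Nat.and_le_left (n := a.toNat) (m := b.toNat)
  omega

theorem pv_band_assoc (a b c : Int) (ha : 0 ≤ a) (hb : 0 ≤ b) (hc : 0 ≤ c) :
    PySem.Int.band (PySem.Int.band a b) c = PySem.Int.band a (PySem.Int.band b c) := by
  rw [PySem.Int.band_of_nonneg ha hb, PySem.Int.band_of_nonneg hb hc,
      PySem.Int.band_of_nonneg (by positivity) hc, PySem.Int.band_of_nonneg ha (by positivity)]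
  simp [Nat.land_assoc]

theorem pv_pre_mono (nn : Int) (bp : List Int) (hbp : ∀ p ∈ bp.take nn.toNat, 0 ≤ p)
    (i j : Int) (hij : i ≤ j) (hjn : j ≤ nn) : pvPre bp i ≤ pvPre bp j := by
  unfold pvPre
  have h : bp.take j.toNat = bp.take i.toNat ++ (bp.drop i.toNat).take (j.toNat - i.toNat) := by
    rw [← List.take_add]
    congr 1
    omega
  rw [h, List.sum_append]
  have : 0 ≤ ((bp.drop i.toNat).take (j.toNat - i.toNat)).sum := by
    apply List.sum_nonneg
    intro x hx
    have hx2 : x ∈ bp.take j.toNat := by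
      rw [h]
      exact List.mem_append_right _ hx
    have hjt : j.toNat ≤ nn.toNat := by omega
    have : bp.take j.toNat = (bp.take nn.toNat).take j.toNat := by
      rw [List.take_take, min_eq_left hjt]
    rw [this] at hx2
    exact hbp x (List.mem_of_mem_take hx2)
  omega

theorem pv_seg_nonneg (nn : Int) (bp : List Int) (hbp : ∀ p ∈ bp.take nn.toNat, 0 ≤ p)
    (i j : Int) (hij : i ≤ j) (hjn : j ≤ nn) : 0 ≤ pvSeg bp i j := by
  have := pv_pre_mono nn bp hbp i j hij hjn
  simp [pvSeg]; omega

theorem pv_vals_nonneg (bp : List Int) (nn : Int) (hbp : ∀ p ∈ bp.take nn.toNat, 0 ≤ p) :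
    ∀ (j : Nat) (i : Int), 0 ≤ i → i ≤ nn → ∀ v ∈ pvVals bp nn i j, 0 ≤ v := by
  intro j
  induction j with
  | zero => intro i _ _ v hv; simp [pvVals] at hv
  | succ j ih =>
    intro i hi hin v hv
    match j, hv with
    | 0, hv =>
      simp [pvVals] at hv
      subst hv
      exact pv_seg_nonneg nn bp hbp i nn hin le_rfl
    | (j'+1), hv =>
      simp only [pvVals, List.mem_flatMap, List.mem_map] at hv
      obtain ⟨t, ht, v', _, rfl⟩ := hv
      have htr := PySem.List.mem_pyRange_one.mp ht
      exact PySem.Int.band_nonneg_of_nonneg_left v' (pv_seg_nonneg nn bp hbp i t (by omega) (by omega))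

theorem pv_vals_nonempty (bp : List Int) (nn : Int) :
    ∀ (j : Nat) (i : Int), 0 ≤ i → i + (j : Int) - 1 ≤ nn → 1 ≤ j → ∃ x, x ∈ pvVals bp nn i j := by
  intro j
  induction j with
  | zero => intro i _ _ h; omega
  | succ j ih =>
    intro i hi hin _
    match j, ih with
    | 0, _ => exact ⟨pvSeg bp i nn, by simp [pvVals]⟩
    | (j'+1), ih =>
      obtain ⟨x, hx⟩ := ih (i+1) (by omega) (by push_cast at hin ⊢; omega) (by omega)
      refine ⟨PySem.Int.band (pvSeg bp i (i+1)) x, ?_⟩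
      simp only [pvVals, List.mem_flatMap, List.mem_map]
      refine ⟨i+1, PySem.List.mem_pyRange_one.mpr ⟨by omega, by push_cast at hin ⊢; omega⟩, x, hx, rfl⟩

-- foldl max facts
theorem pv_foldl_max_ge (l : List Int) (m : Int) : m ≤ l.foldl max m := by
  exact (PySem.List.le_foldl_max l m).1

theorem pv_foldl_max_le_of_all_le (l : List Int) (m b : Int) (hm : m ≤ b)
    (h : ∀ x ∈ l, x ≤ b) : l.foldl max m ≤ b := by
  rcases PySem.List.foldl_max_mem l m with h1 | h1
  · omega
  · exact h _ h1

theorem pv_foldl_max_mem_le (l : List Int) (m : Int) : ∀ x ∈ l, x ≤ l.foldl max m :=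
  (PySem.List.le_foldl_max l m).2

theorem pv_foldl_max_flatMap {α : Type} (l : List α) (f : α → List Int) (m : Int) :
    (l.flatMap f).foldl max m = l.foldl (fun acc t => (f t).foldl max acc) m := by
  induction l generalizing m with
  | nil => rfl
  | cons x xs ih => simp [List.flatMap_cons, List.foldl_append, ih]

-- ===== the sums table of A computes pvSeg =====
theorem pv_getD_setD {α : Type} (xs : List α) (a b : Int) (v d : α)
    (ha0 : 0 ≤ a) (_ha : a < (xs.length : Int)) (hb0 : 0 ≤ b) (hb : b < (xs.length : Int)) :
    PySem.List.pyGetD (PySem.List.pySetD xs a v) b d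
      = if b = a then v else PySem.List.pyGetD xs b d := by
  rw [PySem.List.pySetD_of_nonneg _ _ ha0,
      PySem.List.pyGetD_eq_getElem _ d hb0 (by simpa using hb),
      List.getElem_set]
  split_ifs with h1 h2 h2
  · rfl
  · omega
  · omega
  · rw [PySem.List.pyGetD_eq_getElem _ d hb0 hb]

theorem pv_getD_setD_self {α : Type} (xs : List α) (a : Int) (v d : α)
    (ha0 : 0 ≤ a) (ha : a < (xs.length : Int)) :
    PySem.List.pyGetD (PySem.List.pySetD xs a v) a d = v := by
  rw [pv_getD_setD xs a a v d ha0 ha ha0 ha, if_pos rfl]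

theorem pv_setD_setD {α : Type} (xs : List α) (a : Int) (v w : α) (ha0 : 0 ≤ a) :
    PySem.List.pySetD (PySem.List.pySetD xs a v) a w = PySem.List.pySetD xs a w := by
  rw [PySem.List.pySetD_of_nonneg _ _ ha0, PySem.List.pySetD_of_nonneg _ _ ha0,
      PySem.List.pySetD_of_nonneg _ _ ha0, List.set_set]

theorem pv_setD_getD_self {α : Type} (xs : List α) (a : Int) (d : α)
    (ha0 : 0 ≤ a) (ha : a < (xs.length : Int)) :
    PySem.List.pySetD xs a (PySem.List.pyGetD xs a d) = xs := by
  rw [PySem.List.pyGetD_eq_getElem _ d ha0 ha, PySem.List.pySetD_of_nonneg _ _ ha0,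
      List.set_getElem_self]

theorem pv_getD_repl (n j : Int) (h0 : 0 ≤ j) :
    PySem.List.pyGetD (PySem.List.pyRepeat [(0:Int)] n) j 0 = 0 := by
  rw [PySem.List.pyRepeat_singleton, PySem.List.pyGetD_of_nonneg _ _ h0]
  rcases h : (List.replicate n.toNat (0:Int))[j.toNat]? with _ | x
  · simp [List.getD, h]
  · have := List.mem_of_getElem? h
    simp [List.eq_of_mem_replicate this, List.getD, h]

theorem pv_seg_succ (bp : List Int) (i m : Int) (hm0 : 0 ≤ m) (hm : m < (bp.length : Int)) :
    pvSeg bp i (m+1) = pvSeg bp i m + PySem.List.pyGetD bp m 0 := by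
  unfold pvSeg pvPre
  rw [PySem.List.pyGetD_eq_getElem _ _ hm0 hm]
  have h1 : (m+1).toNat = m.toNat + 1 := by omega
  have h2 : bp[m.toNat]? = some bp[m.toNat] := List.getElem?_eq_getElem (by omega)
  rw [h1, List.take_add_one, List.sum_append, h2]
  simp
  ring

theorem pv_inner_factor {α : Type} [Inhabited α] (g : List α → Int → List α) (i : Int) (hi0 : 0 ≤ i) :
    ∀ (l : List Int) (S : List (List α)), i < (S.length : Int) →
      l.foldl (fun S j => PySem.List.pySetD S i (g (PySem.List.pyGetD S i []) j)) S
        = PySem.List.pySetD S i (l.foldl g (PySem.List.pyGetD S i [])) := by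
  intro l
  induction l with
  | nil => intro S hS; exact (pv_setD_getD_self S i [] hi0 hS).symm
  | cons j rest ih =>
    intro S hS
    simp only [List.foldl_cons]
    have hlen : ((PySem.List.pySetD S i (g (PySem.List.pyGetD S i []) j)).length : Int) = S.length := by
      rw [PySem.List.length_pySetD]
    rw [ih _ (by omega), pv_getD_setD_self _ i _ [] hi0 (by omega), pv_setD_setD _ _ _ _ hi0]

theorem pv_rowA (n : Int) (bp : List Int) (hn : n ≤ (bp.length : Int))
    (i : Int) (hi0 : 0 ≤ i) :
    ∀ (mN : Nat), i + mN ≤ n →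
      ((PySem.List.pyRange (i+1) (i + mN + 1) 1).foldl
        (fun row j => PySem.List.pySetD row j
          (PySem.List.pyGetD row (j-1) 0 + PySem.List.pyGetD bp (j-1) 0))
        (PySem.List.pyRepeat [(0:Int)] (n+1))).length = (n+1).toNat ∧
      ∀ j : Int, 0 ≤ j → j ≤ n →
        PySem.List.pyGetD ((PySem.List.pyRange (i+1) (i + mN + 1) 1).foldl
          (fun row j => PySem.List.pySetD row j
            (PySem.List.pyGetD row (j-1) 0 + PySem.List.pyGetD bp (j-1) 0))
          (PySem.List.pyRepeat [(0:Int)] (n+1))) j 0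
          = if i < j ∧ j ≤ i + mN then pvSeg bp i j else 0 := by
  intro mN
  induction mN with
  | zero =>
    intro _
    rw [show (i + (0:Nat) + 1 : Int) = i + 1 by push_cast; ring, PySem.List.pyRange_one_eq_nil (by omega)]
    simp only [List.foldl_nil]
    constructor
    · rw [PySem.List.pyRepeat_singleton, List.length_replicate]
    · intro j hj0 hjn
      rw [pv_getD_repl _ _ hj0, if_neg (by omega)]
  | succ mN ih =>
    intro hmn
    have ihm := ih (by push_cast at hmn ⊢; omega)
    obtain ⟨ihlen, ihget⟩ := ihm
    have hsplit : PySem.List.pyRange (i+1) (i + (mN+1:Nat) + 1) 1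
        = PySem.List.pyRange (i+1) (i + mN + 1) 1 ++ [i + mN + 1] := by
      rw [show (i + ((mN+1:Nat)) + 1 : Int) = (i + mN + 1) + 1 by push_cast; ring]
      exact PySem.List.pyRange_one_succ_right (by omega)
    rw [hsplit, List.foldl_append]
    set rowP := (PySem.List.pyRange (i+1) (i + mN + 1) 1).foldl
          (fun row j => PySem.List.pySetD row j
            (PySem.List.pyGetD row (j-1) 0 + PySem.List.pyGetD bp (j-1) 0))
          (PySem.List.pyRepeat [(0:Int)] (n+1)) with hrowP
    simp only [List.foldl_cons, List.foldl_nil]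
    have hlenP : (rowP.length : Int) = n + 1 := by rw [ihlen]; omega
    have hmlt : i + mN + 1 < (rowP.length : Int) := by omega
    have hm0 : (0:Int) ≤ i + mN + 1 := by omega
    have hprev : PySem.List.pyGetD rowP (i + mN + 1 - 1) 0 = pvSeg bp i (i + mN) := by
      rw [show (i + mN + 1 - 1 : Int) = i + mN by ring]
      rw [ihget (i + mN) (by omega) (by omega)]
      by_cases hc : i < i + mN
      · rw [if_pos ⟨hc, by omega⟩]
      · rw [if_neg (by omega)]
        have : i + (mN : Int) = i := by omega
        rw [this]
        simp [pvSeg]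
    constructor
    · rw [PySem.List.length_pySetD, ihlen]
    · intro j hj0 hjn
      rw [pv_getD_setD rowP _ j _ 0 hm0 hmlt hj0 (by omega)]
      by_cases hj : j = i + mN + 1
      · rw [if_pos hj, hprev, hj]
        rw [show (i + mN + 1 - 1 : Int) = i + mN by ring]
        rw [pv_seg_succ bp i (i + mN) (by omega) (by omega), if_pos ⟨by omega, by push_cast; omega⟩]
      · rw [if_neg hj, ihget j hj0 hjn]
        by_cases hc : i < j ∧ j ≤ i + mN
        · rw [if_pos hc, if_pos ⟨hc.1, by push_cast; omega⟩]
        · rw [if_neg hc, if_neg (by push_cast at hc ⊢; omega)]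

theorem pv_outerA (n : Int) (bp : List Int) (hn : n ≤ (bp.length : Int)) :
    ∀ (mN : Nat), (mN : Int) ≤ n →
      (((PySem.List.pyRange 0 (mN : Int) 1).foldl (fun S i =>
        (PySem.List.pyRange (i+1) (n+1) 1).foldl (fun S j =>
          PySem.List.pySetD S i (PySem.List.pySetD (PySem.List.pyGetD S i []) j
            (PySem.List.pyGetD (PySem.List.pyGetD S i []) (j-1) 0 + PySem.List.pyGetD bp (j-1) 0))) S)
        ((PySem.List.pyRange 0 (n+1) 1).map (fun _ => PySem.List.pyRepeat [(0:Int)] (n+1)))).length : Int)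
        = n + 1 ∧
      (∀ i : Int, 0 ≤ i → (mN : Int) ≤ i → i ≤ n →
        PySem.List.pyGetD ((PySem.List.pyRange 0 (mN : Int) 1).foldl (fun S i =>
          (PySem.List.pyRange (i+1) (n+1) 1).foldl (fun S j =>
            PySem.List.pySetD S i (PySem.List.pySetD (PySem.List.pyGetD S i []) j
              (PySem.List.pyGetD (PySem.List.pyGetD S i []) (j-1) 0 + PySem.List.pyGetD bp (j-1) 0))) S)
          ((PySem.List.pyRange 0 (n+1) 1).map (fun _ => PySem.List.pyRepeat [(0:Int)] (n+1)))) i []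
          = PySem.List.pyRepeat [(0:Int)] (n+1)) ∧
      (∀ i j : Int, 0 ≤ i → i < (mN : Int) → 0 ≤ j → j ≤ n →
        PySem.List.pyGetD (PySem.List.pyGetD ((PySem.List.pyRange 0 (mN : Int) 1).foldl (fun S i =>
          (PySem.List.pyRange (i+1) (n+1) 1).foldl (fun S j =>
            PySem.List.pySetD S i (PySem.List.pySetD (PySem.List.pyGetD S i []) j
              (PySem.List.pyGetD (PySem.List.pyGetD S i []) (j-1) 0 + PySem.List.pyGetD bp (j-1) 0))) S)
          ((PySem.List.pyRange 0 (n+1) 1).map (fun _ => PySem.List.pyRepeat [(0:Int)] (n+1)))) i []) j 0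
          = if i < j then pvSeg bp i j else 0) := by
  intro mN
  induction mN with
  | zero =>
    intro _
    have h0 : PySem.List.pyRange 0 ((0:Nat):Int) 1 = [] :=
      PySem.List.pyRange_one_eq_nil (by simp)
    rw [h0]
    simp only [List.foldl_nil]
    refine ⟨?_, ?_, ?_⟩
    · rw [List.length_map, PySem.List.length_pyRange_one]; omega
    · intro i hi0 _ hin
      rw [PySem.List.pyGetD_map_pyRange_of_nonneg _ _ _ _ hi0 (by omega)]
    · intro i j _ hi _ _
      omega
  | succ mN ih =>
    intro hmn
    have hm1 : (mN : Int) ≤ n := by push_cast at hmn ⊢; omega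
    obtain ⟨ihlen, ihfresh, ihdone⟩ := ih hm1
    have hsplit : PySem.List.pyRange 0 ((mN+1:Nat) : Int) 1
        = PySem.List.pyRange 0 (mN : Int) 1 ++ [(mN : Int)] := by
      rw [show (((mN+1:Nat)) : Int) = (mN : Int) + 1 by push_cast; ring]
      exact PySem.List.pyRange_one_succ_right (by omega)
    rw [hsplit]
    simp only [List.foldl_append, List.foldl_cons, List.foldl_nil]
    set Sm := (PySem.List.pyRange 0 (mN : Int) 1).foldl (fun S i =>
      (PySem.List.pyRange (i+1) (n+1) 1).foldl (fun S j =>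
        PySem.List.pySetD S i (PySem.List.pySetD (PySem.List.pyGetD S i []) j
          (PySem.List.pyGetD (PySem.List.pyGetD S i []) (j-1) 0 + PySem.List.pyGetD bp (j-1) 0))) S)
      ((PySem.List.pyRange 0 (n+1) 1).map (fun _ => PySem.List.pyRepeat [(0:Int)] (n+1))) with hSm
    have hfact := pv_inner_factor
      (fun row j => PySem.List.pySetD row j
        (PySem.List.pyGetD row (j-1) 0 + PySem.List.pyGetD bp (j-1) 0))
      (mN : Int) (by omega) (PySem.List.pyRange ((mN : Int)+1) (n+1) 1) Sm (by omega)
    rw [hfact, ihfresh (mN : Int) (by omega) (by omega) (by omega)]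
    have hrange : PySem.List.pyRange ((mN : Int)+1) (n+1) 1
        = PySem.List.pyRange ((mN : Int)+1) ((mN : Int) + ((n - mN).toNat : Nat) + 1) 1 := by
      congr 1
      omega
    have hrow := pv_rowA n bp hn (mN : Int) (by omega) ((n - (mN:Int)).toNat) (by omega)
    rw [hrange]
    obtain ⟨hrlen, hrget⟩ := hrow
    set rowNew := (PySem.List.pyRange ((mN : Int)+1) ((mN : Int) + ((n - (mN:Int)).toNat : Nat) + 1) 1).foldl
      (fun row j => PySem.List.pySetD row j
        (PySem.List.pyGetD row (j-1) 0 + PySem.List.pyGetD bp (j-1) 0))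
      (PySem.List.pyRepeat [(0:Int)] (n+1)) with hrowNew
    refine ⟨?_, ?_, ?_⟩
    · rw [PySem.List.length_pySetD]; omega
    · intro i hi0 hmi hin
      rw [pv_getD_setD Sm (mN : Int) i _ [] (by omega) (by omega) hi0 (by omega),
          if_neg (by push_cast at hmi ⊢; omega)]
      exact ihfresh i hi0 (by push_cast at hmi ⊢; omega) hin
    · intro i j hi0 him hj0 hjn
      by_cases hieq : i = (mN : Int)
      · rw [pv_getD_setD Sm (mN : Int) i _ [] (by omega) (by omega) hi0 (by omega), if_pos hieq,
            hrget j hj0 hjn, hieq]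
        by_cases hc : (mN : Int) < j
        · rw [if_pos ⟨hc, by omega⟩, if_pos hc]
        · rw [if_neg (by omega), if_neg hc]
      · rw [pv_getD_setD Sm (mN : Int) i _ [] (by omega) (by omega) hi0 (by omega), if_neg hieq]
        exact ihdone i j hi0 (by push_cast at him ⊢; omega) hj0 hjn

theorem pv_sumsA_get (n : Int) (bp : List Int) (hn : n ≤ (bp.length : Int)) :
    ∀ i j : Int, 0 ≤ i → i ≤ n → i ≤ j → j ≤ n →
      PySem.List.pyGetD (PySem.List.pyGetD (pvSumsA n bp) i []) j 0 = pvSeg bp i j := by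
  intro i j hi0 hin hij hjn
  have h0n : (0:Int) ≤ n := by omega
  have houter := pv_outerA n bp hn n.toNat (by omega)
  obtain ⟨hlen, hfresh, hdone⟩ := houter
  have hrw : ((n.toNat : Nat) : Int) = n := by omega
  rw [hrw] at hlen hfresh hdone
  unfold pvSumsA
  by_cases hi : i < n
  · rw [hdone i j hi0 hi (by omega) hjn]
    by_cases hc : i < j
    · rw [if_pos hc]
    · have : i = j := by omega
      rw [if_neg hc, this]
      simp [pvSeg]
  · have : i = n := by omega
    have hjn' : j = n := by omega
    rw [this, hjn', hfresh n (by omega) (by omega) (by omega), pv_getD_repl _ _ (by omega)]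
    simp [pvSeg]

theorem pv_prefixB_inv (n : Int) (bp : List Int) (hn : n ≤ (bp.length : Int)) :
    ∀ (mN : Nat), (mN : Int) ≤ n →
      (((PySem.List.pyRange 0 (mN : Int) 1).foldl (fun P i =>
        PySem.List.pySetD P (i+1) (PySem.List.pyGetD P i 0 + PySem.List.pyGetD bp i 0))
        (PySem.List.pyRepeat [(0:Int)] (n+1))).length : Int) = n + 1 ∧
      ∀ j : Int, 0 ≤ j → j ≤ n →
        PySem.List.pyGetD ((PySem.List.pyRange 0 (mN : Int) 1).foldl (fun P i =>
          PySem.List.pySetD P (i+1) (PySem.List.pyGetD P i 0 + PySem.List.pyGetD bp i 0))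
          (PySem.List.pyRepeat [(0:Int)] (n+1))) j 0 = if j ≤ (mN : Int) then pvPre bp j else 0 := by
  intro mN
  induction mN with
  | zero =>
    intro _
    have h0 : PySem.List.pyRange 0 ((0:Nat):Int) 1 = [] :=
      PySem.List.pyRange_one_eq_nil (by simp)
    rw [h0]
    simp only [List.foldl_nil]
    constructor
    · rw [PySem.List.pyRepeat_singleton, List.length_replicate]; omega
    · intro j hj0 hjn
      rw [pv_getD_repl _ _ hj0]
      by_cases hc : j ≤ ((0:Nat):Int)
      · have : j = 0 := by omega
        rw [if_pos hc, this]
        simp [pvPre]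
      · rw [if_neg hc]
  | succ mN ih =>
    intro hmn
    obtain ⟨ihlen, ihget⟩ := ih (by push_cast at hmn ⊢; omega)
    have hsplit : PySem.List.pyRange 0 ((mN+1:Nat) : Int) 1
        = PySem.List.pyRange 0 (mN : Int) 1 ++ [(mN : Int)] := by
      rw [show (((mN+1:Nat)) : Int) = (mN : Int) + 1 by push_cast; ring]
      exact PySem.List.pyRange_one_succ_right (by omega)
    rw [hsplit]
    simp only [List.foldl_append, List.foldl_cons, List.foldl_nil]
    set P := (PySem.List.pyRange 0 (mN : Int) 1).foldl (fun P i =>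
      PySem.List.pySetD P (i+1) (PySem.List.pyGetD P i 0 + PySem.List.pyGetD bp i 0))
      (PySem.List.pyRepeat [(0:Int)] (n+1)) with hP
    have hmn' : (mN : Int) < n := by push_cast at hmn ⊢; omega
    constructor
    · rw [PySem.List.length_pySetD]; omega
    · intro j hj0 hjn
      rw [pv_getD_setD P _ j _ 0 (by omega) (by omega) hj0 (by omega)]
      by_cases hj : j = (mN : Int) + 1
      · rw [if_pos hj, ihget (mN : Int) (by omega) (by omega), if_pos (by omega), hj,
            if_pos (by push_cast; omega)]
        have h2 : bp[(mN:Int).toNat]? = some (bp[(mN:Int).toNat]'(by omega)) :=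
          List.getElem?_eq_getElem (by omega)
        have hg : PySem.List.pyGetD bp (mN : Int) 0 = bp[(mN:Int).toNat]'(by omega) :=
          PySem.List.pyGetD_eq_getElem _ _ (by omega) (by omega)
        have : pvPre bp ((mN : Int) + 1) = pvPre bp (mN : Int) + PySem.List.pyGetD bp (mN : Int) 0 := by
          unfold pvPre
          rw [show ((mN:Int)+1).toNat = (mN:Int).toNat + 1 by omega, List.take_add_one,
              List.sum_append, h2, hg]
          simp
        omega
      · rw [if_neg hj, ihget j hj0 hjn]
        by_cases hc : j ≤ (mN : Int)
        · rw [if_pos hc, if_pos (by push_cast; omega)]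
        · rw [if_neg hc, if_neg (by push_cast; omega)]

-- ===== the pref table of B computes pvPre =====
theorem pv_prefixB_get (n : Int) (bp : List Int) (hn : n ≤ (bp.length : Int)) :
    ∀ i : Int, 0 ≤ i → i ≤ n →
      PySem.List.pyGetD ((PySem.List.pyRange 0 n 1).foldl (fun P i =>
        PySem.List.pySetD P (i+1) (PySem.List.pyGetD P i 0 + PySem.List.pyGetD bp i 0))
        (PySem.List.pyRepeat [(0:Int)] (n+1))) i 0 = pvPre bp i := by
  intro i hi0 hin
  obtain ⟨_, hget⟩ := pv_prefixB_inv n bp hn n.toNat (by omega)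
  have hrw : ((n.toNat : Nat) : Int) = n := by omega
  rw [hrw] at hget
  rw [hget i hi0 hin, if_pos hin]

-- ===== A's search equals the fold of pvVals =====
theorem pv_searchA_eq (n k : Int) (bp : List Int) (hn : n ≤ (bp.length : Int))
    (hbp : ∀ p ∈ bp.take n.toNat, 0 ≤ p) :
    ∀ (j : Nat) (l i r m : Int), 1 ≤ j → (j : Int) = k - l → 1 ≤ l →
      0 ≤ i → i ≤ n → 0 ≤ r → 0 ≤ m →
      pvSearchA (pvSumsA n bp) n k r i l m
        = ((pvVals bp n i j).map (fun v => PySem.Int.band r v)).foldl max m := by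
  intro j
  induction j with
  | zero => intro l i r m h1; omega
  | succ j' ih =>
    intro l i r m _ hjk hl1 hi0 hin hr0 hm0
    rw [pvSearchA]
    by_cases hpr : l > 0 ∧ r ≤ m
    · rw [if_pos hpr]
      have hall : ∀ x ∈ (pvVals bp n i (j'+1)).map (fun v => PySem.Int.band r v), x ≤ m := by
        intro x hx
        simp only [List.mem_map] at hx
        obtain ⟨v, hv, rfl⟩ := hx
        have hv0 := pv_vals_nonneg bp n hbp (j'+1) i hi0 hin v hv
        have := pv_band_le_left r v hr0 hv0
        omega
      have h1 := pv_foldl_max_ge ((pvVals bp n i (j'+1)).map (fun v => PySem.Int.band r v)) m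
      have h2 := pv_foldl_max_le_of_all_le ((pvVals bp n i (j'+1)).map (fun v => PySem.Int.band r v)) m m le_rfl hall
      omega
    · rw [if_neg hpr]
      match j', ih with
      | 0, _ =>
        rw [if_pos (by omega)]
        have hlast := pv_sumsA_get n bp hn i n hi0 hin hin le_rfl
        simp only []
        rw [hlast]
        simp only [pvVals, List.map_cons, List.map_nil, List.foldl_cons, List.foldl_nil]
        by_cases h : PySem.Int.band r (pvSeg bp i n) ≤ m
        · rw [if_neg (by omega)]; omega
        · rw [if_pos (by omega)]; omega
      | (j''+1), ih =>
        rw [if_neg (by omega)]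
        simp only []
        rw [List.foldl_attach (f := fun (m t : Int) =>
          pvSearchA (pvSumsA n bp) n k
            (if l = 0 then PySem.List.pyGetD (PySem.List.pyGetD (pvSumsA n bp) i []) t 0
             else PySem.Int.band r (PySem.List.pyGetD (PySem.List.pyGetD (pvSumsA n bp) i []) t 0))
            t (l+1) m)]
        have hrhs : ((pvVals bp n i (j''+2)).map (fun v => PySem.Int.band r v)).foldl max m
            = (PySem.List.pyRange (i+1) (n+1) 1).foldl (fun acc t =>
                ((pvVals bp n t (j''+1)).map (fun v =>
                  PySem.Int.band r (PySem.Int.band (pvSeg bp i t) v))).foldl max acc) m := by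
          rw [show pvVals bp n i (j''+2) = (PySem.List.pyRange (i+1) (n+1) 1).flatMap (fun t =>
              (pvVals bp n t (j''+1)).map (fun v => PySem.Int.band (pvSeg bp i t) v)) from rfl,
            List.map_flatMap, pv_foldl_max_flatMap]
          simp only [List.map_map, Function.comp_def]
        rw [hrhs]
        -- fold both sides over the range, stepwise
        have hgen : ∀ (L : List Int), (∀ t ∈ L, i + 1 ≤ t ∧ t < n + 1) → ∀ (m : Int), 0 ≤ m →
            L.foldl (fun m t =>
              pvSearchA (pvSumsA n bp) n k
                (if l = 0 then PySem.List.pyGetD (PySem.List.pyGetD (pvSumsA n bp) i []) t 0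
                 else PySem.Int.band r (PySem.List.pyGetD (PySem.List.pyGetD (pvSumsA n bp) i []) t 0))
                t (l+1) m) m
              = L.foldl (fun acc t =>
                ((pvVals bp n t (j''+1)).map (fun v =>
                  PySem.Int.band r (PySem.Int.band (pvSeg bp i t) v))).foldl max acc) m := by
          intro L
          induction L with
          | nil => intro _ m _; rfl
          | cons t L ihL =>
            intro hmem m hm0
            simp only [List.foldl_cons]
            have ht := hmem t (List.mem_cons_self ..)
            have hseg := pv_sumsA_get n bp hn i t hi0 hin (by omega) (by omega)
            have hstep : pvSearchA (pvSumsA n bp) n k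
                (if l = 0 then PySem.List.pyGetD (PySem.List.pyGetD (pvSumsA n bp) i []) t 0
                 else PySem.Int.band r (PySem.List.pyGetD (PySem.List.pyGetD (pvSumsA n bp) i []) t 0))
                t (l+1) m
                = ((pvVals bp n t (j''+1)).map (fun v =>
                  PySem.Int.band r (PySem.Int.band (pvSeg bp i t) v))).foldl max m := by
              rw [if_neg (by omega), hseg]
              have hbnn : 0 ≤ PySem.Int.band r (pvSeg bp i t) :=
                PySem.Int.band_nonneg_of_nonneg_left _ hr0
              rw [ih (l+1) t (PySem.Int.band r (pvSeg bp i t)) m (by omega) (by omega) (by omega)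
                (by omega) (by omega) hbnn hm0]
              congr 1
              apply List.map_congr_left
              intro v hv
              have hv0 := pv_vals_nonneg bp n hbp (j''+1) t (by omega) (by omega) v hv
              exact pv_band_assoc r (pvSeg bp i t) v hr0
                (pv_seg_nonneg n bp hbp i t (by omega) (by omega)) hv0
            rw [hstep]
            exact ihL (fun x hx => hmem x (List.mem_cons_of_mem _ hx)) _
              (le_trans hm0 (pv_foldl_max_ge _ m))
        exact hgen (PySem.List.pyRange (i+1) (n+1) 1)
          (fun t ht => (PySem.List.mem_pyRange_one.mp ht)) m hm0

theorem pv_A_eq (n k : Int) (bp : List Int) (hn : n ≤ (bp.length : Int))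
    (hk2 : 2 ≤ k) (hbp : ∀ p ∈ bp.take n.toNat, 0 ≤ p) :
    calculate_maximum_beauty n k bp = (pvVals bp n 0 k.toNat).foldl max 0 := by
  unfold calculate_maximum_beauty
  · rw [if_neg (by omega)]
    rw [pvSearchA]
    rw [if_neg (by omega), if_neg (by omega)]
    simp only [if_true]
    rw [List.foldl_attach (f := fun (m t : Int) =>
      pvSearchA (pvSumsA n bp) n k
        (PySem.List.pyGetD (PySem.List.pyGetD (pvSumsA n bp) 0 []) t 0)
        t (0+1) m)]
    obtain ⟨jk, hjk⟩ : ∃ jk : Nat, k.toNat = jk + 2 := ⟨k.toNat - 2, by omega⟩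
    rw [hjk]
    rw [show pvVals bp n 0 (jk+2) = (PySem.List.pyRange (0+1) (n+1) 1).flatMap (fun t =>
        (pvVals bp n t (jk+1)).map (fun v => PySem.Int.band (pvSeg bp 0 t) v)) from rfl,
      pv_foldl_max_flatMap]
    have hgen : ∀ (L : List Int), (∀ t ∈ L, 0 + 1 ≤ t ∧ t < n + 1) → ∀ (m : Int), 0 ≤ m →
        L.foldl (fun m t =>
          pvSearchA (pvSumsA n bp) n k
            (PySem.List.pyGetD (PySem.List.pyGetD (pvSumsA n bp) 0 []) t 0)
            t (0+1) m) m
          = L.foldl (fun acc t =>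
            ((pvVals bp n t (jk+1)).map (fun v => PySem.Int.band (pvSeg bp 0 t) v)).foldl max acc) m := by
      intro L
      induction L with
      | nil => intro _ m _; rfl
      | cons t L ihL =>
        intro hmem m hm0
        simp only [List.foldl_cons]
        have ht := hmem t (List.mem_cons_self ..)
        have hseg := pv_sumsA_get n bp hn 0 t le_rfl (by omega) (by omega) (by omega)
        rw [hseg]
        have hsg0 : 0 ≤ pvSeg bp 0 t := pv_seg_nonneg n bp hbp 0 t (by omega) (by omega)
        rw [pv_searchA_eq n k bp hn hbp (jk+1) (0+1) t (pvSeg bp 0 t) m (by omega)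
          (by push_cast; omega) (by omega) (by omega) (by omega) hsg0 hm0]
        exact ihL (fun x hx => hmem x (List.mem_cons_of_mem _ hx)) _
          (le_trans hm0 (pv_foldl_max_ge _ m))
    exact hgen (PySem.List.pyRange (0+1) (n+1) 1)
      (fun t ht => (PySem.List.mem_pyRange_one.mp ht)) 0 le_rfl

theorem pv_foldl_const_iter {α β : Type} (f : α → α) :
    ∀ (l : List β) (x : α), l.foldl (fun s _ => f s) x = f^[l.length] x := by
  intro l
  induction l with
  | nil => intro x; rfl
  | cons y l ih =>
    intro x
    simp only [List.foldl_cons, List.length_cons, ih, Function.iterate_succ_apply]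

theorem pv_valsB_mem (n : Int) (bp P : List Int) (hn : n ≤ (bp.length : Int))
    (hP : ∀ i : Int, 0 ≤ i → i ≤ n → PySem.List.pyGetD P i 0 = pvPre bp i) :
    ∀ (r : Nat) (i : Int), 0 ≤ i → i ≤ n → ∀ x : Int,
      (x ∈ PySem.List.pyGetD
        ((fun vs => (PySem.List.pyRange 0 (n+1) 1).map (fun i =>
          PySem.Set.ofList ((PySem.List.pyRange (i+1) (n+1) 1).flatMap (fun t =>
            (PySem.List.pyGetD vs t []).map (fun v =>
              PySem.Int.band (PySem.List.pyGetD P t 0 - PySem.List.pyGetD P i 0) v)))))^[r]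
          ((PySem.List.pyRange 0 (n+1) 1).map (fun i =>
            PySem.Set.ofList [PySem.List.pyGetD P n 0 - PySem.List.pyGetD P i 0]))) i [])
        ↔ x ∈ pvVals bp n i (r+1) := by
  intro r
  induction r with
  | zero =>
    intro i hi0 hin x
    rw [Function.iterate_zero_apply,
        PySem.List.pyGetD_map_pyRange_of_nonneg _ _ _ _ hi0 (by omega),
        hP n (by omega) le_rfl, hP i hi0 hin]
    simp only [pvVals, PySem.Set.mem_ofList, List.mem_singleton]
    unfold pvSeg
    constructor <;> (intro h; omega)
  | succ r ih =>
    intro i hi0 hin x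
    rw [Function.iterate_succ_apply',
        PySem.List.pyGetD_map_pyRange_of_nonneg _ _ _ _ hi0 (by omega)]
    rw [PySem.Set.mem_ofList, List.mem_flatMap]
    constructor
    · rintro ⟨t, ht, hx⟩
      rw [List.mem_map] at hx
      obtain ⟨v, hv, rfl⟩ := hx
      have htr := PySem.List.mem_pyRange_one.mp ht
      rw [ih t (by omega) (by omega) v] at hv
      show _ ∈ (PySem.List.pyRange (i+1) (n+1) 1).flatMap (fun t =>
        (pvVals bp n t (r+1)).map (fun v => PySem.Int.band (pvSeg bp i t) v))
      rw [List.mem_flatMap]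
      refine ⟨t, ht, ?_⟩
      rw [List.mem_map]
      refine ⟨v, hv, ?_⟩
      rw [hP t (by omega) (by omega), hP i hi0 hin]
      rfl
    · intro hx
      rw [show pvVals bp n i (r+1+1) = (PySem.List.pyRange (i+1) (n+1) 1).flatMap (fun t =>
        (pvVals bp n t (r+1)).map (fun v => PySem.Int.band (pvSeg bp i t) v)) from rfl,
        List.mem_flatMap] at hx
      obtain ⟨t, ht, hx⟩ := hx
      rw [List.mem_map] at hx
      obtain ⟨v, hv, rfl⟩ := hx
      have htr := PySem.List.mem_pyRange_one.mp ht
      refine ⟨t, ht, ?_⟩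
      rw [List.mem_map]
      refine ⟨v, (ih t (by omega) (by omega) v).mpr hv, ?_⟩
      rw [hP t (by omega) (by omega), hP i hi0 hin]
      rfl

theorem pv_B_eq (n k : Int) (bp : List Int) (hn : n ≤ (bp.length : Int))
    (hk2 : 2 ≤ k) (hkn : k ≤ n) (hbp : ∀ p ∈ bp.take n.toNat, 0 ≤ p) :
    calculate_maximum_beauty_alt n k bp = (pvVals bp n 0 k.toNat).foldl max 0 := by
  unfold calculate_maximum_beauty_alt
  rw [if_neg (by omega), if_neg (by omega)]
  simp only []
  set P := (PySem.List.pyRange 0 n 1).foldl (fun P i =>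
      PySem.List.pySetD P (i+1) (PySem.List.pyGetD P i 0 + PySem.List.pyGetD bp i 0))
      (PySem.List.pyRepeat [(0:Int)] (n+1)) with hPdef
  have hP : ∀ i : Int, 0 ≤ i → i ≤ n → PySem.List.pyGetD P i 0 = pvPre bp i :=
    fun i hi0 hin => pv_prefixB_get n bp hn i hi0 hin
  rw [pv_foldl_const_iter (f := fun vs => (PySem.List.pyRange 0 (n+1) 1).map (fun i =>
        PySem.Set.ofList ((PySem.List.pyRange (i+1) (n+1) 1).flatMap (fun t =>
          (PySem.List.pyGetD vs t []).map (fun v =>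
            PySem.Int.band (PySem.List.pyGetD P t 0 - PySem.List.pyGetD P i 0) v)))))]
  rw [PySem.List.length_pyRange_one]
  have hmem := pv_valsB_mem n bp P hn hP ((k - 1 - 0).toNat) 0 le_rfl (by omega)
  have hcast : (k - 1 - 0).toNat + 1 = k.toNat := by omega
  rw [hcast] at hmem
  set s := PySem.List.pyGetD
        ((fun vs => (PySem.List.pyRange 0 (n+1) 1).map (fun i =>
          PySem.Set.ofList ((PySem.List.pyRange (i+1) (n+1) 1).flatMap (fun t =>
            (PySem.List.pyGetD vs t []).map (fun v =>
              PySem.Int.band (PySem.List.pyGetD P t 0 - PySem.List.pyGetD P i 0) v)))))^[(k - 1 - 0).toNat]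
          ((PySem.List.pyRange 0 (n+1) 1).map (fun i =>
            PySem.Set.ofList [PySem.List.pyGetD P n 0 - PySem.List.pyGetD P i 0]))) 0 [] with hs
  obtain ⟨x0, hx0⟩ := pv_vals_nonempty bp n k.toNat 0 le_rfl (by omega) (by omega)
  have hsne : s ≠ [] := by
    intro hnil
    have := (hmem x0).mpr hx0
    rw [hnil] at this
    simp at this
  rcases hmax : PySem.List.max? s (fun v => v) with _ | mB
  · exact absurd ((PySem.List.max?_eq_none_iff s (fun v => v)).mp hmax) hsne
  · simp only [Option.getD_some]
    have hmB_mem : mB ∈ s := PySem.List.max?_mem hmax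
    have hmB_V : mB ∈ pvVals bp n 0 k.toNat := (hmem mB).mp hmB_mem
    have h1 : mB ≤ (pvVals bp n 0 k.toNat).foldl max 0 :=
      pv_foldl_max_mem_le _ 0 mB hmB_V
    have h2 : (pvVals bp n 0 k.toNat).foldl max 0 ≤ mB := by
      rcases PySem.List.foldl_max_mem (pvVals bp n 0 k.toNat) 0 with hz | hv
      · have := pv_vals_nonneg bp n hbp k.toNat 0 le_rfl (by omega) mB hmB_V
        omega
      · exact PySem.List.max?_isMax hmax _ ((hmem _).mpr hv)
    omega

-- A's search never updates maxResult when k <= 0 (currLines = k-1 is unreachable)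
theorem pv_searchA_stuck_low (S : List (List Int)) (n k : Int) (hk : k ≤ 0) :
    ∀ (N : Nat) (i l r m : Int), (n + 1 - i).toNat ≤ N → 0 ≤ l →
      pvSearchA S n k r i l m = m := by
  intro N
  induction N with
  | zero =>
    intro i l r m hN hl0
    rw [pvSearchA]
    by_cases hpr : l > 0 ∧ r ≤ m
    · rw [if_pos hpr]
    · rw [if_neg hpr, if_neg (by omega)]
      rw [PySem.List.pyRange_one_eq_nil (by omega)]
      rfl
  | succ N ihN =>
    intro i l r m hN hl0
    rw [pvSearchA]
    by_cases hpr : l > 0 ∧ r ≤ m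
    · rw [if_pos hpr]
    · rw [if_neg hpr, if_neg (by omega)]
      simp only []
      rw [List.foldl_attach (f := fun (m t : Int) =>
        pvSearchA S n k
          (if l = 0 then PySem.List.pyGetD (PySem.List.pyGetD S i []) t 0
           else PySem.Int.band r (PySem.List.pyGetD (PySem.List.pyGetD S i []) t 0))
          t (l+1) m)]
      have hgen : ∀ (L : List Int), (∀ t ∈ L, i + 1 ≤ t ∧ t < n + 1) → ∀ (m : Int),
          L.foldl (fun (m t : Int) =>
            pvSearchA S n k
              (if l = 0 then PySem.List.pyGetD (PySem.List.pyGetD S i []) t 0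
               else PySem.Int.band r (PySem.List.pyGetD (PySem.List.pyGetD S i []) t 0))
              t (l+1) m) m = m := by
        intro L
        induction L with
        | nil => intro _ m; rfl
        | cons t L ihL =>
          intro hmem m
          have ht := hmem t (List.mem_cons_self ..)
          simp only [List.foldl_cons]
          rw [ihN t (l+1) _ m (by omega) (by omega)]
          exact ihL (fun x hx => hmem x (List.mem_cons_of_mem _ hx)) m
      exact hgen _ (fun t ht => PySem.List.mem_pyRange_one.mp ht) m

-- with 2 <= k and k > n every complete split ends in an empty final segment, AND value 0
theorem pv_searchA_stuck_high (n k : Int) (bp : List Int) (hn : n ≤ (bp.length : Int))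
    (hk2 : 2 ≤ k) (hkn : n + 1 ≤ k) :
    ∀ (N : Nat) (i l r m : Int), (n + 1 - i).toNat ≤ N → 1 ≤ l → l ≤ i → i ≤ n → 0 ≤ m →
      pvSearchA (pvSumsA n bp) n k r i l m = m := by
  intro N
  induction N with
  | zero =>
    intro i l r m hN hl1 hli hin hm0
    rw [pvSearchA]
    by_cases hpr : l > 0 ∧ r ≤ m
    · rw [if_pos hpr]
    · rw [if_neg hpr]
      by_cases hlk : l = k - 1
      · rw [if_pos hlk]
        have hieq : i = n := by omega
        have h0 := pv_sumsA_get n bp hn i n (by omega) hin (by omega) le_rfl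
        simp only []
        rw [h0, hieq]
        rw [show pvSeg bp n n = 0 by simp [pvSeg]]
        rw [PySem.Int.band_zero]
        rw [if_neg (by omega)]
      · rw [if_neg hlk]
        rw [PySem.List.pyRange_one_eq_nil (by omega)]
        rfl
  | succ N ihN =>
    intro i l r m hN hl1 hli hin hm0
    rw [pvSearchA]
    by_cases hpr : l > 0 ∧ r ≤ m
    · rw [if_pos hpr]
    · rw [if_neg hpr]
      by_cases hlk : l = k - 1
      · rw [if_pos hlk]
        have hieq : i = n := by omega
        have h0 := pv_sumsA_get n bp hn i n (by omega) hin (by omega) le_rfl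
        simp only []
        rw [h0, hieq]
        rw [show pvSeg bp n n = 0 by simp [pvSeg]]
        rw [PySem.Int.band_zero]
        rw [if_neg (by omega)]
      · rw [if_neg hlk]
        simp only []
        rw [List.foldl_attach (f := fun (m t : Int) =>
          pvSearchA (pvSumsA n bp) n k
            (if l = 0 then PySem.List.pyGetD (PySem.List.pyGetD (pvSumsA n bp) i []) t 0
             else PySem.Int.band r (PySem.List.pyGetD (PySem.List.pyGetD (pvSumsA n bp) i []) t 0))
            t (l+1) m)]
        have hgen : ∀ (L : List Int), (∀ t ∈ L, i + 1 ≤ t ∧ t < n + 1) →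
            L.foldl (fun (m t : Int) =>
              pvSearchA (pvSumsA n bp) n k
                (if l = 0 then PySem.List.pyGetD (PySem.List.pyGetD (pvSumsA n bp) i []) t 0
                 else PySem.Int.band r (PySem.List.pyGetD (PySem.List.pyGetD (pvSumsA n bp) i []) t 0))
                t (l+1) m) m = m := by
          intro L
          induction L with
          | nil => intro _; rfl
          | cons t L ihL =>
            intro hmem
            have ht := hmem t (List.mem_cons_self ..)
            simp only [List.foldl_cons]
            rw [ihN t (l+1) _ m (by omega) (by omega) (by omega) (by omega) hm0]
            exact ihL (fun x hx => hmem x (List.mem_cons_of_mem _ hx))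
        exact hgen _ (fun t ht => PySem.List.mem_pyRange_one.mp ht)

-- A returns 0 whenever k /= 1 and no split into k nonempty in-range segments exists
theorem pv_A_zero (n k : Int) (bp : List Int) (hn : n ≤ (bp.length : Int))
    (hk1 : k ≠ 1) (hz : k ≤ 0 ∨ n + 1 ≤ k) :
    calculate_maximum_beauty n k bp = 0 := by
  unfold calculate_maximum_beauty
  rw [if_neg hk1, pvSearchA]
  rw [if_neg (by omega), if_neg (by omega)]
  simp only [if_true]
  rw [List.foldl_attach (f := fun (m t : Int) =>
    pvSearchA (pvSumsA n bp) n k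
      (PySem.List.pyGetD (PySem.List.pyGetD (pvSumsA n bp) 0 []) t 0)
      t (0+1) m)]
  have hgen : ∀ (L : List Int), (∀ t ∈ L, 0 + 1 ≤ t ∧ t < n + 1) →
      L.foldl (fun (m t : Int) =>
        pvSearchA (pvSumsA n bp) n k
          (PySem.List.pyGetD (PySem.List.pyGetD (pvSumsA n bp) 0 []) t 0)
          t (0+1) m) 0 = 0 := by
    intro L
    induction L with
    | nil => intro _; rfl
    | cons t L ihL =>
      intro hmem
      have ht := hmem t (List.mem_cons_self ..)
      simp only [List.foldl_cons]
      rcases hz with hlow | hhigh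
      · rw [pv_searchA_stuck_low (pvSumsA n bp) n k hlow (n + 1 - t).toNat t (0+1) _ 0
          le_rfl (by omega)]
        exact ihL (fun x hx => hmem x (List.mem_cons_of_mem _ hx))
      · have hk2 : 2 ≤ k := by omega
        rw [pv_searchA_stuck_high n k bp hn hk2 hhigh (n + 1 - t).toNat t (0+1) _ 0
          le_rfl (by omega) (by omega) (by omega) le_rfl]
        exact ihL (fun x hx => hmem x (List.mem_cons_of_mem _ hx))
  exact hgen _ (fun t ht => PySem.List.mem_pyRange_one.mp ht)

-- ===== VERDICT (by name: the statement is the Claim_ definition above) =====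
theorem calculate_maximum_beauty_spec : Claim_equal_calculate_maximum_beauty := by
  intro n k bp _ hpre
  obtain ⟨hn, hbp⟩ := hpre
  unfold Spec_calculate_maximum_beauty
  by_cases hk1 : k = 1
  · unfold calculate_maximum_beauty calculate_maximum_beauty_alt
    rw [if_pos hk1, if_pos hk1]
  · by_cases hkr : 2 ≤ k ∧ k ≤ n
    · rw [pv_A_eq n k bp hn hkr.1 (hbp hkr), pv_B_eq n k bp hn hkr.1 hkr.2 (hbp hkr)]
    · have hz : k ≤ 0 ∨ n + 1 ≤ k := by omega
      rw [pv_A_zero n k bp hn hk1 hz]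
      unfold calculate_maximum_beauty_alt
      rw [if_neg hk1, if_pos (by omega)]
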